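-- pv_equiv track=rewrite | github.com/yui666a/impliedAnger | dir/format_text.py | join_sentence_if_start_left_paren
-- ===== SOURCE A (Python) =====
-- def join_sentence_if_start_left_paren(sentences):
--     new_sentence = []
--     for i, sentence in enumerate(sentences):
--         if i == 0:
--             new_sentence.append(sentence)
--             continue
--
--         if sentence[0] == "(":
--             new_sentence[-1] += sentence
--         else:
--             new_sentence.append(sentence)
--
--     return new_sentence
-- ===== SOURCE B (Python) =====
-- def join_sentence_if_start_left_paren(sentences):
--     # Span-based grouping: for each group start i, scan forward to the end j of the
--     # maximal run of following '('-starting sentences, emit the joined slice, jump to j.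
--     out = []
--     i = 0
--     n = len(sentences)
--     while i < n:
--         j = i + 1
--         while j < n and sentences[j][0] == "(":
--             j += 1
--         out.append("".join(sentences[i:j]))
--         i = j
--     return out
-- ===== Notes on version B (the rewrite author's own statement) =====
-- stated objective: alternative
-- what changed: B is a recursive span decomposition: it takes the head sentence, scans forward to find the maximal run of following '('-starting sentences, emits head joined with that run as one group, and recurses on the remainder; A is a single accumulator loop mutating the last element in place.
import Mathlib
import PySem

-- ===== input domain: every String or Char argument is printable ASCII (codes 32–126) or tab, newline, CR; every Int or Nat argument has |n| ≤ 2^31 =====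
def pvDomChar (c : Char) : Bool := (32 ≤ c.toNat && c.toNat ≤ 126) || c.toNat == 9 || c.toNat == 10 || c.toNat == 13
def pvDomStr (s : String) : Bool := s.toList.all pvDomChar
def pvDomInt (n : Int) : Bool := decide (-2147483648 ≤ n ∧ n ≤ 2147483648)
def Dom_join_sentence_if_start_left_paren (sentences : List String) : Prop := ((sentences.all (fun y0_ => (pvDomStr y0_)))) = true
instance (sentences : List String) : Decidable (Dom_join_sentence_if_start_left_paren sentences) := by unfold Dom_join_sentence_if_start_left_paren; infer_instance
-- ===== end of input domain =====

-- B replaces A's accumulator loop by a recursive span decomposition: head + the maximal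
-- run of following '('-sentences forms one group, then recurse (objective: alternative).

-- ===== PORT A =====
-- the 'for i, sentence in enumerate(sentences)' loop, carrying new_sentence
def pvA_loop (newSentence : List String) (rest : List (Int × String)) : List String :=
  match rest with
  | [] => newSentence
  | (i, sentence) :: rest =>
    if i = 0 then
      pvA_loop (newSentence ++ [sentence]) rest
    else if PySem.Str.pyGet? sentence 0 = some '(' then
      -- sentence[0] == "(" ; Python raises IndexError on "" (pyGet? = none), excluded by Pre_
      pvA_loop (newSentence.dropLast ++ [(newSentence.getLast?.getD "") ++ sentence]) rest
    else
      pvA_loop (newSentence ++ [sentence]) rest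

def join_sentence_if_start_left_paren (sentences : List String) : List String :=
  pvA_loop [] (PySem.List.enumerate sentences)

-- ===== PORT B =====
-- the inner 'while j < n and sentences[j][0] == "(": j += 1' scan of Source B
-- (sentences.getD j "" is Python's sentences[j]: j is a Nat and the guard keeps it in range)
def pvB_scan (sentences : List String) (j : Nat) : Nat :=
  if j < sentences.length then
    if PySem.Str.pyGet? (sentences.getD j "") 0 = some '(' then pvB_scan sentences (j + 1)
    else j
  else j
termination_by sentences.length - j

-- the scan never moves backwards (cited by pvB_outer's termination proof)
lemma pvB_scan_ge (sentences : List String) : ∀ (j : Nat), j ≤ pvB_scan sentences j := by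
  have H : ∀ (n j : Nat), sentences.length - j ≤ n → j ≤ pvB_scan sentences j := by
    intro n
    induction n with
    | zero => intro j h; rw [pvB_scan, if_neg (by omega)]
    | succ n ihn =>
      intro j h
      rw [pvB_scan]
      by_cases hj : j < sentences.length
      · rw [if_pos hj]
        by_cases hc : PySem.Str.pyGet? (sentences.getD j "") 0 = some '('
        · rw [if_pos hc]; have := ihn (j + 1) (by omega); omega
        · rw [if_neg hc]
      · rw [if_neg hj]
  exact fun j => H (sentences.length - j) j le_rfl

-- the outer 'while i < n' loop of Source B, emitting one joined span per iteration
def pvB_outer (sentences : List String) (i : Nat) : List String :=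
  if h : i < sentences.length then
    let j := pvB_scan sentences (i + 1)
    PySem.Str.join "" (PySem.List.slice sentences (some (i : Int)) (some (j : Int))) ::
      pvB_outer sentences j
  else []
termination_by sentences.length - i
decreasing_by have := pvB_scan_ge sentences (i + 1); omega

def join_sentence_if_start_left_paren_alt (sentences : List String) : List String :=
  pvB_outer sentences 0

-- ===== PRECONDITION & SPEC =====
-- Pre_ excludes exactly the inputs where Python A raises IndexError: a sentence after the
-- first that is the empty string (sentence[0] fails there).
def Pre_join_sentence_if_start_left_paren (sentences : List String) : Prop :=
  ∀ s ∈ sentences.tail, s ≠ ""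
instance (sentences : List String) : Decidable (Pre_join_sentence_if_start_left_paren sentences) := by
  unfold Pre_join_sentence_if_start_left_paren; infer_instance

def pvWitness_join_sentence_if_start_left_paren : List String :=
  ["He left.", "(angrily)", "She stayed."]

def Spec_join_sentence_if_start_left_paren (sentences : List String) (out : List String) : Prop :=
  out = join_sentence_if_start_left_paren_alt sentences
instance (sentences : List String) (out : List String) : Decidable (Spec_join_sentence_if_start_left_paren sentences out) := by
  unfold Spec_join_sentence_if_start_left_paren; infer_instance

-- ===== CLAIM (what is proved, stated in full; the proofs are below) =====
def Claim_equal_join_sentence_if_start_left_paren : Prop :=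
  ∀ (sentences : List String), Dom_join_sentence_if_start_left_paren sentences →
    Pre_join_sentence_if_start_left_paren sentences →
    Spec_join_sentence_if_start_left_paren sentences (join_sentence_if_start_left_paren sentences)

-- ===== LEMMAS AND PROOFS =====

-- fold-shaped middle form bridging A's loop and B's span loop
def pvAlt' (g : String) (rest : List String) : List String :=
  match rest with
  | [] => [g]
  | s :: r =>
    if PySem.Str.pyGet? s 0 = some '(' then pvAlt' (g ++ s) r else g :: pvAlt' s r

-- structural form of B's span loop: head ++ joined run, recurse on the remainder
def pvAltSpan : List String → List String
  | [] => []
  | g :: rest =>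
    (g ++ PySem.Str.join "" (rest.take (pvB_scan rest 0))) ::
      pvAltSpan (rest.drop (pvB_scan rest 0))
termination_by l => l.length
decreasing_by simp

lemma pvJ_nil : PySem.Str.join "" ([] : List String) = "" := by
  apply String.toList_inj.mp
  simp [PySem.Chars.join_nil]

lemma pvJ_cons (s : String) (l : List String) :
    PySem.Str.join "" (s :: l) = s ++ PySem.Str.join "" l := by
  apply String.toList_inj.mp
  cases l with
  | nil => simp [PySem.Chars.join_singleton, PySem.Chars.join_nil]
  | cons b l => simp [PySem.Chars.join_cons_cons]

lemma pvStr_append_assoc (a b c : String) : a ++ b ++ c = a ++ (b ++ c) := by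
  apply String.toList_inj.mp
  simp

lemma pvStr_append_empty (a : String) : a ++ "" = a := by
  apply String.toList_inj.mp
  simp

-- A's loop computes acc ++ pvAlt' g rest once the first element g is placed
lemma pvA_loop_eq (rest : List String) :
    ∀ (i : Int), 1 ≤ i → ∀ (acc : List String) (g : String),
      pvA_loop (acc ++ [g]) (PySem.List.enumerate rest i) = acc ++ pvAlt' g rest := by
  induction rest with
  | nil => intro i _ acc g; simp [PySem.List.enumerate_nil, pvA_loop, pvAlt']
  | cons s r ih =>
    intro i hi acc g
    rw [PySem.List.enumerate_cons, pvA_loop]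
    rw [if_neg (by omega)]
    by_cases hc : PySem.Str.pyGet? s 0 = some '('
    · rw [if_pos hc]
      simp only [List.dropLast_concat, List.getLast?_concat, Option.getD_some]
      rw [ih (i + 1) (by omega) acc (g ++ s)]
      conv_rhs => rw [pvAlt']
      rw [if_pos hc]
    · rw [if_neg hc]
      have h := ih (i + 1) (by omega) (acc ++ [g]) s
      rw [List.append_assoc] at h
      rw [List.append_assoc, h, List.append_assoc]
      conv_rhs => rw [pvAlt']
      rw [if_neg hc]
      simp

lemma pvB_scan_stop (r : List String) (k : Nat) (h : r.length ≤ k) : pvB_scan r k = k := by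
  rw [pvB_scan, if_neg (by omega)]

lemma pvB_scan_le (r : List String) :
    ∀ (k : Nat), k ≤ r.length → pvB_scan r k ≤ r.length := by
  have H : ∀ (n k : Nat), r.length - k ≤ n → k ≤ r.length → pvB_scan r k ≤ r.length := by
    intro n
    induction n with
    | zero => intro k h hk; rw [pvB_scan_stop r k (by omega)]; omega
    | succ n ihn =>
      intro k h hk
      rw [pvB_scan]
      by_cases hj : k < r.length
      · rw [if_pos hj]
        by_cases hc : PySem.Str.pyGet? (r.getD k "") 0 = some '('
        · rw [if_pos hc]; exact ihn (k + 1) (by omega) (by omega)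
        · rw [if_neg hc]; omega
      · rw [if_neg hj]; omega
  exact fun k hk => H (r.length - k) k le_rfl hk

lemma pvB_scan_shift (r : List String) :
    ∀ (k : Nat) (s : String), pvB_scan (s :: r) (k + 1) = pvB_scan r k + 1 := by
  have H : ∀ (n k : Nat) (s : String), r.length - k ≤ n →
      pvB_scan (s :: r) (k + 1) = pvB_scan r k + 1 := by
    intro n
    induction n with
    | zero =>
      intro k s h
      rw [pvB_scan_stop (s :: r) (k + 1) (by simp; omega),
        pvB_scan_stop r k (by omega)]
    | succ n ihn =>
      intro k s h
      by_cases hk : k < r.length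
      · conv_lhs => rw [pvB_scan]
        rw [if_pos (by simp; omega),
          show (s :: r).getD (k + 1) "" = r.getD k "" from rfl]
        conv_rhs => rw [pvB_scan]
        rw [if_pos hk]
        by_cases hc : PySem.Str.pyGet? (r.getD k "") 0 = some '('
        · rw [if_pos hc, if_pos hc]
          exact ihn (k + 1) s (by omega)
        · rw [if_neg hc, if_neg hc]
      · rw [pvB_scan_stop (s :: r) (k + 1) (by simp; omega),
          pvB_scan_stop r k (by omega)]
  exact fun k s => H (r.length - k) k s le_rfl

lemma pvB_scan_add (pre : List String) :
    ∀ (r : List String) (k : Nat),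
      pvB_scan (pre ++ r) (pre.length + k) = pre.length + pvB_scan r k := by
  induction pre with
  | nil => intro r k; simp
  | cons s pre ih =>
    intro r k
    have h1 : (s :: pre).length + k = (pre.length + k) + 1 := by simp; omega
    rw [h1, List.cons_append, pvB_scan_shift (pre ++ r) (pre.length + k) s, ih r k]
    simp; omega

-- B's span loop equals the structural span form on the remaining suffix
lemma pvB_outer_eq (l : List String) :
    ∀ (n i : Nat), i ≤ l.length → l.length - i ≤ n →
      pvB_outer l i = pvAltSpan (l.drop i) := by
  intro n
  induction n with
  | zero =>
    intro i hle h
    rw [pvB_outer, dif_neg (by omega), List.drop_eq_nil_of_le (by omega), pvAltSpan]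
  | succ n ihn =>
    intro i hle h
    by_cases hi : i < l.length
    · have hsplit : l.drop i = l.getD i "" :: l.drop (i + 1) := by
        rw [List.getD_eq_getElem l "" hi, List.drop_eq_getElem_cons hi]
      have hscan : pvB_scan l (i + 1) = i + 1 + pvB_scan (l.drop (i + 1)) 0 := by
        have hadd := pvB_scan_add (l.take (i + 1)) (l.drop (i + 1)) 0
        rw [List.take_append_drop] at hadd
        rw [show (l.take (i + 1)).length = i + 1 from by simp; omega] at hadd
        simpa using hadd
      set k0 := pvB_scan (l.drop (i + 1)) 0 with hk0
      have hk0le : k0 ≤ l.length - (i + 1) := by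
        have := pvB_scan_le (l.drop (i + 1)) 0 (by omega)
        simpa [hk0] using this
      have hstep : pvB_outer l i =
          PySem.Str.join "" (PySem.List.slice l (some (i : Int))
            (some ((pvB_scan l (i + 1) : Nat) : Int))) ::
            pvB_outer l (pvB_scan l (i + 1)) := by
        rw [pvB_outer, dif_pos hi]
      have hslice : PySem.List.slice l (some (i : Int)) (some ((i + 1 + k0 : Nat) : Int)) =
          l.getD i "" :: (l.drop (i + 1)).take k0 := by
        rw [PySem.List.slice_natCast, show i + 1 + k0 - i = k0 + 1 from by omega, hsplit]
        rfl
      have hdrop : l.drop (i + 1 + k0) = (l.drop (i + 1)).drop k0 := by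
        rw [List.drop_drop]
      have hrec := ihn (i + 1 + k0) (by omega) (by omega)
      rw [hstep, hscan, hslice, hrec, hdrop]
      conv_rhs => rw [hsplit, pvAltSpan]
      rw [← hk0, pvJ_cons]
    · rw [pvB_outer, dif_neg hi, List.drop_eq_nil_of_le (by omega), pvAltSpan]

-- the structural span form equals the fold-shaped middle form
lemma pvSpan_eq_alt' (rest : List String) :
    ∀ (g : String), pvAltSpan (g :: rest) = pvAlt' g rest := by
  induction rest with
  | nil =>
    intro g
    rw [pvAltSpan, pvB_scan_stop [] 0 (by simp)]
    simp only [List.take_nil, List.drop_nil, pvJ_nil, pvStr_append_empty]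
    rw [pvAltSpan, pvAlt']
  | cons s r ih =>
    intro g
    rw [pvAltSpan]
    by_cases hc : PySem.Str.pyGet? s 0 = some '('
    · have hk : pvB_scan (s :: r) 0 = pvB_scan r 0 + 1 := by
        conv_lhs => rw [pvB_scan]
        rw [if_pos (by simp), show (s :: r).getD 0 "" = s from rfl, if_pos hc]
        exact pvB_scan_shift r 0 s
      rw [hk, show (s :: r).take (pvB_scan r 0 + 1) = s :: r.take (pvB_scan r 0) from rfl,
        show (s :: r).drop (pvB_scan r 0 + 1) = r.drop (pvB_scan r 0) from rfl,
        pvJ_cons, ← pvStr_append_assoc]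
      have hih := ih (g ++ s)
      rw [pvAltSpan] at hih
      rw [hih]
      conv_rhs => rw [pvAlt']
      rw [if_pos hc]
    · have hk : pvB_scan (s :: r) 0 = 0 := by
        conv_lhs => rw [pvB_scan]
        rw [if_pos (by simp), show (s :: r).getD 0 "" = s from rfl, if_neg hc]
      rw [hk, List.take_zero, List.drop_zero, pvJ_nil, pvStr_append_empty, ih s]
      conv_rhs => rw [pvAlt']
      rw [if_neg hc]

-- ===== VERDICT (by name: the statement is the Claim_ definition above) =====
theorem join_sentence_if_start_left_paren_spec : Claim_equal_join_sentence_if_start_left_paren := by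
  intro sentences _ _
  unfold Spec_join_sentence_if_start_left_paren
  unfold join_sentence_if_start_left_paren_alt
  rw [pvB_outer_eq sentences sentences.length 0 (by omega) (by omega), List.drop_zero]
  cases sentences with
  | nil =>
    simp [join_sentence_if_start_left_paren, PySem.List.enumerate_nil, pvA_loop, pvAltSpan]
  | cons x rest =>
    unfold join_sentence_if_start_left_paren
    rw [PySem.List.enumerate_cons, pvA_loop, if_pos rfl, pvSpan_eq_alt' rest x]
    have h := pvA_loop_eq rest 1 le_rfl [] x
    simpa using h
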